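-- pv_equiv track=rewrite | github.com/veryshiny/motif-mark | motif-mark-oop.py | intron_exon_split
-- ===== SOURCE A (Python) =====
-- def intron_exon_split(instring):
--     uplow = instring[0].isupper() # boolean to check whether the first letter is uppercase or not
--
--     splitted = []
--     new_word = ""
--     position_counter = 0
--
--     for c in instring:
--         if c.isupper() == uplow:
--             new_word += c
--             position_counter+=1
--         else:
--             if c.isupper()!=True:
--                 splitted.append(("E",new_word,len(new_word),position_counter-len(new_word)))
--             else:
--                 splitted.append(("I",new_word,len(new_word),position_counter-len(new_word)))
--
--             new_word = c
--             position_counter+=1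
--             uplow = not uplow
--
--     if c.isupper()==True:
--                 splitted.append(("E",new_word,len(new_word),position_counter-len(new_word)))
--     else:
--                 splitted.append(("I",new_word,len(new_word),position_counter-len(new_word)))
--
--       # bc no change at end of string
--
--     return splitted
-- ===== SOURCE B (Python) =====
-- def intron_exon_split(instring):
--     # Split into maximal runs of same case: scan run boundaries directly,
--     # emitting each run with its label, text, length and start position.
--     out = []
--     pos = 0
--     rest = instring
--     while rest:
--         k = rest[0].isupper()
--         n = 1
--         while n < len(rest) and rest[n].isupper() == k:
--             n += 1
--         out.append(("E" if k else "I", rest[:n], n, pos))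
--         pos += n
--         rest = rest[n:]
--     return out
-- ===== Notes on version B (the rewrite author's own statement) =====
-- stated objective: simpler
-- what changed: Replaces A's flip-flop boolean state machine with deferred appends and an after-loop finalization by a direct run-boundary scan that emits each maximal same-case run as it is found; A raises IndexError on the empty string (excluded by Pre_), where B naturally returns [].
import Mathlib
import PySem

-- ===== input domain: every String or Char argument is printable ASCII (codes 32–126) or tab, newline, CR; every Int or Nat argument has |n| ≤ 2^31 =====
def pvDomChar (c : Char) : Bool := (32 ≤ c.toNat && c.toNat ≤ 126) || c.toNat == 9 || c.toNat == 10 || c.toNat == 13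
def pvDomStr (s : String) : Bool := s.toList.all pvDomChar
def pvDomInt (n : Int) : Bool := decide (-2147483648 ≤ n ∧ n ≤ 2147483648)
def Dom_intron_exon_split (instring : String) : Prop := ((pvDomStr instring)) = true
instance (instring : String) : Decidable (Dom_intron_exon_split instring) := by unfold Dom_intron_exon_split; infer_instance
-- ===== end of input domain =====

-- B replaces A's flip-flop state machine (deferred append + after-loop finalization)
-- with a direct run-boundary scan emitting each maximal same-case run; return values only.

-- ===== PORT A =====
-- the for-loop of A: state (uplow, splitted, new_word, position_counter), plus the
-- loop variable c, which Python keeps after the loop for the final append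
def pvLoopA (l : List Char) (uplow : Bool)
    (splitted : List (String × String × Int × Int))
    (new_word : List Char) (pos : Int) (c : Char) :
    List (String × String × Int × Int) :=
  match l with
  | [] =>
      -- after the loop: `if c.isupper()==True: append ("E",…) else: append ("I",…)`
      if PySem.Chars.isupper c = true then
        splitted ++ [("E", String.ofList new_word, (new_word.length : Int), pos - new_word.length)]
      else
        splitted ++ [("I", String.ofList new_word, (new_word.length : Int), pos - new_word.length)]
  | c' :: rest =>
      if PySem.Chars.isupper c' = uplow then
        pvLoopA rest uplow splitted (new_word ++ [c']) (pos + 1) c'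
      else
        if PySem.Chars.isupper c' ≠ true then
          pvLoopA rest (!uplow)
            (splitted ++ [("E", String.ofList new_word, (new_word.length : Int), pos - new_word.length)])
            [c'] (pos + 1) c'
        else
          pvLoopA rest (!uplow)
            (splitted ++ [("I", String.ofList new_word, (new_word.length : Int), pos - new_word.length)])
            [c'] (pos + 1) c'

def intron_exon_split (instring : String) : List (String × String × Int × Int) :=
  match instring.toList with
  | [] => []  -- Python raises IndexError at instring[0]; excluded by Pre_
  | c0 :: rest => pvLoopA (c0 :: rest) (PySem.Chars.isupper c0) [] [] 0 c0

-- ===== PORT B =====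
-- Source B's outer while loop: peel off the maximal prefix run of `rest` with the same
-- case as its first character (the inner while computes n = 1 + length of that
-- takeWhile; rest[:n] / rest[n:] are the run and the remainder), advance pos.
def pvRuns (l : List Char) (pos : Int) : List (String × String × Int × Int) :=
  match l with
  | [] => []
  | c :: rest =>
      let t := rest.takeWhile (fun d => PySem.Chars.isupper d == PySem.Chars.isupper c)
      ((if PySem.Chars.isupper c then "E" else "I"), String.ofList (c :: t),
        ((c :: t).length : Int), pos) ::
        pvRuns (rest.dropWhile (fun d => PySem.Chars.isupper d == PySem.Chars.isupper c))
          (pos + (c :: t).length)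
termination_by l.length
decreasing_by
  simp only [List.length_cons]
  exact Nat.lt_succ_of_le (List.length_dropWhile_le _ _)

def intron_exon_split_alt (instring : String) : List (String × String × Int × Int) :=
  pvRuns instring.toList 0

-- ===== PRECONDITION & SPEC =====
-- Pre_ excludes only the empty string, on which A raises IndexError.
def Pre_intron_exon_split (instring : String) : Prop := instring ≠ ""
instance (instring : String) : Decidable (Pre_intron_exon_split instring) := by
  unfold Pre_intron_exon_split; infer_instance
def pvWitness_intron_exon_split : String := "abCDe"

def Spec_intron_exon_split (instring : String) (out : List (String × String × Int × Int)) : Prop := out = intron_exon_split_alt instring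
instance (instring : String) (out : List (String × String × Int × Int)) : Decidable (Spec_intron_exon_split instring out) := by unfold Spec_intron_exon_split; infer_instance

-- ===== CLAIM (what is proved, stated in full; the proofs are below) =====
def Claim_equal_intron_exon_split : Prop := ∀ (instring : String), Dom_intron_exon_split instring → Pre_intron_exon_split instring → Spec_intron_exon_split instring (intron_exon_split instring)

-- ===== LEMMAS AND PROOFS =====

-- Invariant: while the current run (of case `uplow`, last char `c`) is still open,
-- A's loop produces the already-emitted segments, then the completed current run
-- (extended by the matching prefix of `l`), then B's runs of the remainder.
theorem pvLoopA_eq (l : List Char) : ∀ (uplow : Bool)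
    (splitted : List (String × String × Int × Int)) (new_word : List Char)
    (pos : Int) (c : Char), PySem.Chars.isupper c = uplow →
    pvLoopA l uplow splitted new_word pos c =
      splitted ++
        ((if uplow then "E" else "I"),
          String.ofList (new_word ++ l.takeWhile (fun d => PySem.Chars.isupper d == uplow)),
          ((new_word ++ l.takeWhile (fun d => PySem.Chars.isupper d == uplow)).length : Int),
          pos - new_word.length) ::
        pvRuns (l.dropWhile (fun d => PySem.Chars.isupper d == uplow))
          (pos + (l.takeWhile (fun d => PySem.Chars.isupper d == uplow)).length) := by
  induction l with
  | nil =>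
      intro uplow splitted new_word pos c hc
      simp [pvLoopA, pvRuns, hc]
      cases uplow <;> simp_all
  | cons c' rest ih =>
      intro uplow splitted new_word pos c hc
      by_cases h : PySem.Chars.isupper c' = uplow
      · rw [pvLoopA, if_pos h, ih uplow splitted (new_word ++ [c']) (pos + 1) c' h]
        simp [h]
        congr 1
        ring
      · have hne : PySem.Chars.isupper c' = !uplow := by
          cases uplow <;> simp_all
        have htw : (c' :: rest).takeWhile (fun d => PySem.Chars.isupper d == uplow) = [] := by
          simp [List.takeWhile_cons, h]
        have hdw : (c' :: rest).dropWhile (fun d => PySem.Chars.isupper d == uplow)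
            = c' :: rest := by
          simp [List.dropWhile_cons, h]
        have hrec : pvLoopA rest (!uplow)
            (splitted ++ [((if uplow then "E" else "I"), String.ofList new_word,
              (new_word.length : Int), pos - new_word.length)]) [c'] (pos + 1) c'
            = splitted ++
              ((if uplow then "E" else "I"), String.ofList new_word,
                (new_word.length : Int), pos - new_word.length) ::
              pvRuns (c' :: rest) pos := by
          rw [ih (!uplow) _ [c'] (pos + 1) c' hne]
          rw [pvRuns]
          simp only [hne, List.append_assoc, List.singleton_append, List.length_cons,
            List.length_nil, List.length_singleton, Nat.cast_add, Nat.cast_one]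
          norm_num
          congr 1
          ring
        rw [pvLoopA, if_neg h]
        rw [htw, hdw]
        by_cases hE : PySem.Chars.isupper c' ≠ true
        · rw [if_pos hE]
          have hup : uplow = true := by cases uplow <;> simp_all
          subst hup
          simpa using hrec
        · rw [if_neg hE]
          have hup : uplow = false := by cases uplow <;> simp_all
          subst hup
          simpa using hrec

-- ===== VERDICT (by name: the statement is the Claim_ definition above) =====
theorem intron_exon_split_spec : Claim_equal_intron_exon_split := by
  intro instring _ hpre
  unfold Spec_intron_exon_split intron_exon_split intron_exon_split_alt
  cases hl : instring.toList with
  | nil =>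
      exact absurd (by ext1; simp [hl]) hpre
  | cons c0 rest =>
      show pvLoopA (c0 :: rest) (PySem.Chars.isupper c0) [] [] 0 c0 = pvRuns (c0 :: rest) 0
      rw [pvLoopA_eq (c0 :: rest) (PySem.Chars.isupper c0) [] [] 0 c0 rfl]
      rw [pvRuns]
      simp
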